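-- pv_equiv track=rewrite | github.com/kelvinhuang0327/number-pattern-research | tools/evaluate_115000011.py | method_cold_numbers_w100
-- ===== SOURCE A (Python) =====
-- from collections import Counter, defaultdict
--
-- MAX_NUM = 38       # Power Lotto main numbers: 1-38
--
-- def method_cold_numbers_w100(history):
--     """Cold numbers: 6 least frequent in last 100 draws."""
--     recent = history[-100:]
--     freq = Counter()
--     for d in recent:
--         for n in d['numbers']:
--             freq[n] += 1
--
--     sorted_nums = sorted(range(1, MAX_NUM + 1), key=lambda x: freq.get(x, 0))
--     top6 = sorted(sorted_nums[:6])
--     return [top6], None, "6 coldest numbers in last 100 draws"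
-- ===== SOURCE B (Python) =====
-- MAX_NUM = 38       # Power Lotto main numbers: 1-38
--
-- def method_cold_numbers_w100(history):
--     """Cold numbers: 6 least frequent in last 100 draws (bucket-by-count, no sort of the 38 keys)."""
--     recent = history[-100:]
--     freq = [0] * (MAX_NUM + 1)
--     for d in recent:
--         for n in d['numbers']:
--             if 1 <= n <= MAX_NUM:
--                 freq[n] += 1
--     maxc = max(freq)
--     cold = []
--     for c in range(maxc + 1):
--         if len(cold) >= 6:
--             break
--         for n in range(1, MAX_NUM + 1):
--             if freq[n] == c:
--                 cold.append(n)
--     top6 = sorted(cold[:6])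
--     return [top6], None, "6 coldest numbers in last 100 draws"
-- ===== Notes on version B (the rewrite author's own statement) =====
-- stated objective: alternative
-- what changed: Replaces Counter + stable sort of the 38 numbers by frequency with a length-39 frequency array distributed into count buckets that are read off by scanning count values 0,1,2,... upward until 6 numbers are collected (no sort by frequency at all).
import Mathlib
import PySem

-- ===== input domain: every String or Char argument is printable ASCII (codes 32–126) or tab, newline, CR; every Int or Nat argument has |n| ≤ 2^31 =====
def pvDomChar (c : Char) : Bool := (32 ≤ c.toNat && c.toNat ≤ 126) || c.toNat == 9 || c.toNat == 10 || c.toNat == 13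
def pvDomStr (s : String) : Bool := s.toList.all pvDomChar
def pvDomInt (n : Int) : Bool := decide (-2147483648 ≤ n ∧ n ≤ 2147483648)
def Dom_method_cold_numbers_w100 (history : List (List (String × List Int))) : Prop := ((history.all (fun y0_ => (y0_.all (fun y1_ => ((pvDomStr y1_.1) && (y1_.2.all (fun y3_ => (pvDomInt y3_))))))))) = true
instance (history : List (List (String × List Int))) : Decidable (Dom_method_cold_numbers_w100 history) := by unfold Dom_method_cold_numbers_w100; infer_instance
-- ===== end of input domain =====

-- B replaces "sort all 38 numbers by frequency, take 6" by a Counter-free distribute-then-scan: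
-- a length-39 frequency array, buckets read off by scanning count values 0,1,2,… upward (no sort of the keys).
-- Return-value equivalence only; neither version mutates its argument.

-- d['numbers'] (KeyError when absent is excluded by Pre_)
def pvNums (d : List (String × List Int)) : List Int := (PySem.Dict.ofList d).getD "numbers" []

def pvMAX_NUM : Int := 38

-- ===== PORT A =====
def method_cold_numbers_w100 (history : List (List (String × List Int))) : List (List Int) × Option Int × String :=
  let recent := PySem.List.slice history (some (-100)) none
  let freq := recent.foldl (fun f d => (pvNums d).foldl (fun f n => f.modify n 0 (· + 1)) f) (PySem.Dict.empty : PySem.Dict Int Int)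
  let sortedNums := PySem.List.sorted (PySem.List.pyRange 1 (pvMAX_NUM + 1)) (fun x => freq.getD x 0)
  let top6 := PySem.List.sorted (PySem.List.slice sortedNums none (some 6)) (fun x => x)
  ([top6], none, "6 coldest numbers in last 100 draws")

-- ===== PORT B =====
def method_cold_numbers_w100_alt (history : List (List (String × List Int))) : List (List Int) × Option Int × String :=
  let recent := PySem.List.slice history (some (-100)) none
  let freq := recent.foldl
    (fun f d => (pvNums d).foldl
      (fun f n => if 1 ≤ n ∧ n ≤ pvMAX_NUM then f.set n.toNat (f.getD n.toNat 0 + 1) else f) f)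
    (List.replicate (pvMAX_NUM + 1).toNat (0 : Int))
  let maxc := (PySem.List.max? freq (fun y => y)).getD 0
  let cold := (PySem.List.pyRange 0 (maxc + 1)).foldl
    (fun cold c => if 6 ≤ cold.length then cold
      else (PySem.List.pyRange 1 (pvMAX_NUM + 1)).foldl
        (fun cold n => if freq.getD n.toNat 0 = c then cold ++ [n] else cold) cold)
    []
  let top6 := PySem.List.sorted (PySem.List.slice cold none (some 6)) (fun x => x)
  ([top6], none, "6 coldest numbers in last 100 draws")

-- ===== PRECONDITION & SPEC =====
-- Pre_ excludes exactly the draws in the last-100 window whose dict lacks the key 'numbers': there A raises KeyError.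
def Pre_method_cold_numbers_w100 (history : List (List (String × List Int))) : Prop :=
  ∀ d ∈ PySem.List.slice history (some (-100)) none, (PySem.Dict.ofList d).contains "numbers" = true
instance (history : List (List (String × List Int))) : Decidable (Pre_method_cold_numbers_w100 history) := by unfold Pre_method_cold_numbers_w100; infer_instance
def pvWitness_method_cold_numbers_w100 : (List (List (String × List Int))) := [[("numbers", [1, 2, 3])]]

def Spec_method_cold_numbers_w100 (history : List (List (String × List Int))) (out : List (List Int) × Option Int × String) : Prop := out = method_cold_numbers_w100_alt history
instance (history : List (List (String × List Int))) (out : List (List Int) × Option Int × String) : Decidable (Spec_method_cold_numbers_w100 history out) := by unfold Spec_method_cold_numbers_w100; infer_instance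

-- ===== CLAIM (what is proved, stated in full; the proofs are below) =====
def Claim_equal_method_cold_numbers_w100 : Prop := ∀ (history : List (List (String × List Int))), Dom_method_cold_numbers_w100 history → Pre_method_cold_numbers_w100 history → Spec_method_cold_numbers_w100 history (method_cold_numbers_w100 history)

-- ===== LEMMAS AND PROOFS =====

-- insertBy only looks at comparisons of the inserted element with members of the list
theorem pv_insertBy_congr {α : Type} (b1 b2 : α → α → Bool) (x : α) :
    ∀ (ys : List α), (∀ y ∈ ys, b1 x y = b2 x y) →
      PySem.List.insertBy b1 x ys = PySem.List.insertBy b2 x ys := by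
  intro ys
  induction ys with
  | nil => intro _; rfl
  | cons y ys ih =>
    intro h
    have hy : b1 x y = b2 x y := h y (by simp)
    simp only [PySem.List.insertBy, hy]
    split
    · rfl
    · rw [ih (fun z hz => h z (by simp [hz]))]

-- insertion sort with two comparators that agree on (later, earlier) pairs
theorem pv_foldl_insertBy_congr {α : Type} (b1 b2 : α → α → Bool) :
    ∀ (xs acc : List α), (∀ x ∈ xs, ∀ y ∈ acc, b1 x y = b2 x y) →
      xs.Pairwise (fun a b => b1 b a = b2 b a) →
      xs.foldl (fun a x => PySem.List.insertBy b1 x a) acc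
        = xs.foldl (fun a x => PySem.List.insertBy b2 x a) acc := by
  intro xs
  induction xs with
  | nil => intro acc _ _; rfl
  | cons x xs ih =>
    intro acc h hp
    simp only [List.foldl_cons]
    rw [pv_insertBy_congr b1 b2 x acc (fun y hy => h x (by simp) y hy)]
    rcases List.pairwise_cons.mp hp with ⟨hx, hp'⟩
    apply ih _ _ hp'
    intro z hz y hy
    rcases (PySem.List.mem_insertBy _ _ _ _).mp hy with rfl | hy'
    · exact hx z hz
    · exact h z (by simp [hz]) y hy'

-- distributing xs into per-key buckets is a permutation of xs
theorem pv_flatMap_filter_perm (k : Int → Int) :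
    ∀ (cs xs : List Int), cs.Nodup → (∀ x ∈ xs, k x ∈ cs) →
      (cs.flatMap (fun c => xs.filter (fun n => decide (k n = c)))).Perm xs := by
  intro cs
  induction cs with
  | nil =>
    intro xs _ h
    have : xs = [] := by
      cases xs with
      | nil => rfl
      | cons a t => exact absurd (h a (by simp)) (by simp)
    simp [this]
  | cons c cs ih =>
    intro xs hnd h
    rcases List.nodup_cons.mp hnd with ⟨hc, hnd'⟩
    simp only [List.flatMap_cons]
    set xs' := xs.filter (fun n => !decide (k n = c)) with hxs'
    have hcongr : ∀ c' ∈ cs,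
        xs.filter (fun n => decide (k n = c')) = xs'.filter (fun n => decide (k n = c')) := by
      intro c' hc'
      rw [hxs', List.filter_filter]
      apply List.filter_congr
      intro a _
      by_cases hk : k a = c'
      · have hne : ¬ k a = c := by
          intro he
          have hcc : c = c' := by rw [← he, hk]
          exact hc (hcc ▸ hc')
        have hcf : (c' = c) = False := eq_false fun he => hne (hk.trans he)
        simp [hk, hcf]
      · simp [hk]
    have hmap : cs.flatMap (fun c' => xs.filter (fun n => decide (k n = c')))
        = cs.flatMap (fun c' => xs'.filter (fun n => decide (k n = c'))) := by
      simp only [List.flatMap]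
      rw [List.map_congr_left hcongr]
    rw [hmap]
    have hih : (cs.flatMap (fun c' => xs'.filter (fun n => decide (k n = c')))).Perm xs' := by
      apply ih _ hnd'
      intro x hx
      rw [hxs', List.mem_filter] at hx
      have := h x hx.1
      simp only [List.mem_cons] at this
      rcases this with he | hm
      · exact absurd he (by simpa using hx.2)
      · exact hm
    exact (List.Perm.append_left _ hih).trans (List.filter_append_perm (fun n => decide (k n = c)) xs)

-- the concatenated buckets are strictly increasing under the tie-breaking key 39*k+id
theorem pv_flatMap_filter_pairwise (k : Int → Int) :
    ∀ (cs xs : List Int), cs.Pairwise (· < ·) → xs.Pairwise (· < ·) →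
      (∀ x ∈ xs, 1 ≤ x ∧ x ≤ 38) →
      (cs.flatMap (fun c => xs.filter (fun n => decide (k n = c)))).Pairwise
        (fun a b => 39 * k a + a < 39 * k b + b) := by
  intro cs
  induction cs with
  | nil => intro xs _ _ _; simp
  | cons c cs ih =>
    intro xs hcs hxs hb
    rcases List.pairwise_cons.mp hcs with ⟨hclt, hcs'⟩
    simp only [List.flatMap_cons]
    rw [List.pairwise_append]
    refine ⟨?_, ih xs hcs' hxs hb, ?_⟩
    · have := (hxs.filter (fun n => decide (k n = c)))
      apply List.Pairwise.imp_of_mem ?_ this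
      intro a b ha hb' hab
      rw [List.mem_filter] at ha hb'
      have hka : k a = c := by simpa using ha.2
      have hkb : k b = c := by simpa using hb'.2
      rw [hka, hkb]; omega
    · intro a ha b hbm
      rw [List.mem_filter] at ha
      have hka : k a = c := by simpa using ha.2
      rcases List.mem_flatMap.mp hbm with ⟨c', hc', hbf⟩
      rw [List.mem_filter] at hbf
      have hkb : k b = c' := by simpa using hbf.2
      have h1 := hb a ha.1
      have h2 := hb b hbf.1
      have h3 := hclt c' hc'
      rw [hka, hkb]; omega

theorem pv_pyRange_pairwise_lt (a b : Int) : (PySem.List.pyRange a b).Pairwise (· < ·) := by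
  by_cases h : a < b
  · rw [PySem.List.pyRange_one_cons h]
    refine List.Pairwise.cons ?_ (pv_pyRange_pairwise_lt (a+1) b)
    intro x hx
    have := PySem.List.mem_pyRange_one.mp hx
    omega
  · have : PySem.List.pyRange a b = [] := by
      rw [List.eq_nil_iff_forall_not_mem]
      intro x hx
      have := PySem.List.mem_pyRange_one.mp hx
      omega
    rw [this]
    exact List.Pairwise.nil
termination_by (b - a).toNat
decreasing_by omega

-- once 6 elements are collected the scan appends nothing more
theorem pv_foldl_guard_done (g : Int → List Int) :
    ∀ (cs : List Int) (acc : List Int), 6 ≤ acc.length →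
      cs.foldl (fun a c => if 6 ≤ a.length then a else a ++ g c) acc = acc := by
  intro cs
  induction cs with
  | nil => intro acc _; rfl
  | cons c cs ih =>
    intro acc h
    simp only [List.foldl_cons, if_pos h]
    exact ih acc h

-- the early-stopping bucket scan yields a prefix of the full concatenation, total or of length ≥ 6
theorem pv_foldl_guard_prefix (g : Int → List Int) :
    ∀ (cs : List Int) (acc : List Int),
      (cs.foldl (fun a c => if 6 ≤ a.length then a else a ++ g c) acc) <+: acc ++ cs.flatMap g ∧
      ((cs.foldl (fun a c => if 6 ≤ a.length then a else a ++ g c) acc) = acc ++ cs.flatMap g ∨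
        6 ≤ (cs.foldl (fun a c => if 6 ≤ a.length then a else a ++ g c) acc).length) := by
  intro cs
  induction cs with
  | nil => intro acc; simp
  | cons c cs ih =>
    intro acc
    by_cases h : 6 ≤ acc.length
    · have hdone : (c :: cs).foldl (fun a c => if 6 ≤ a.length then a else a ++ g c) acc = acc := by
        simp only [List.foldl_cons, if_pos h]
        exact pv_foldl_guard_done g cs acc h
      rw [hdone]
      exact ⟨List.prefix_append _ _, Or.inr h⟩
    · have hstep : (c :: cs).foldl (fun a c => if 6 ≤ a.length then a else a ++ g c) acc
          = cs.foldl (fun a c => if 6 ≤ a.length then a else a ++ g c) (acc ++ g c) := by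
        simp only [List.foldl_cons, if_neg h]
      rw [hstep]
      rcases ih (acc ++ g c) with ⟨hpre, hd⟩
      rw [List.flatMap_cons, ← List.append_assoc]
      exact ⟨hpre, hd⟩

theorem pv_prefix_take {α : Type} {l₁ l₂ : List α} (h : l₁ <+: l₂) (n : Nat) (hn : n ≤ l₁.length) :
    l₁.take n = l₂.take n := by
  rcases h with ⟨t, rfl⟩
  rw [List.take_append_of_le_length hn]

-- the frequency array computes the in-range counts and keeps length 39
theorem pv_array_count :
    ∀ (ns : List Int) (f : List Int), f.length = 39 →
      (ns.foldl (fun f n => if 1 ≤ n ∧ n ≤ pvMAX_NUM then f.set n.toNat (f.getD n.toNat 0 + 1) else f) f).length = 39 ∧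
      ∀ i : Int, 1 ≤ i → i ≤ 38 →
        (ns.foldl (fun f n => if 1 ≤ n ∧ n ≤ pvMAX_NUM then f.set n.toNat (f.getD n.toNat 0 + 1) else f) f).getD i.toNat 0
          = f.getD i.toNat 0 + ns.count i := by
  intro ns
  induction ns with
  | nil => intro f hf; exact ⟨hf, fun i _ _ => by simp⟩
  | cons n ns ih =>
    intro f hf
    simp only [List.foldl_cons]
    set f' := if 1 ≤ n ∧ n ≤ pvMAX_NUM then f.set n.toNat (f.getD n.toNat 0 + 1) else f with hf'def
    have hf' : f'.length = 39 := by
      rw [hf'def]; split <;> simp [hf]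
    rcases ih f' hf' with ⟨hl, hcnt⟩
    refine ⟨hl, ?_⟩
    intro i h1 h2
    rw [hcnt i h1 h2]
    have hi : i.toNat < f.length := by omega
    have hstep : f'.getD i.toNat 0 = f.getD i.toNat 0 + (if n = i then 1 else 0) := by
      rw [hf'def]
      by_cases hni : n = i
      · subst hni
        rw [if_pos (by unfold pvMAX_NUM; omega), if_pos rfl]
        rw [List.getD_eq_getElem?_getD, List.getElem?_set_self hi]
        rfl
      · rw [if_neg hni]
        split
        · rw [List.getD_eq_getElem?_getD, List.getElem?_set_ne (by omega), ← List.getD_eq_getElem?_getD]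
          omega
        · simp
    rw [hstep]
    by_cases hni : n = i
    · subst hni
      simp
      omega
    · simp [hni]

-- the heart of the equivalence: stable sort-by-count, take 6  =  early-stopped ascending bucket scan, take 6
theorem pv_select_eq (k : Int → Int) (maxc : Int)
    (hub : ∀ x : Int, 1 ≤ x → x ≤ 38 → 0 ≤ k x ∧ k x ≤ maxc) :
    (PySem.List.sorted (PySem.List.pyRange 1 39) k).take 6 =
    ((PySem.List.pyRange 0 (maxc + 1)).foldl
      (fun a c => if 6 ≤ a.length then a
        else a ++ (PySem.List.pyRange 1 39).filter (fun n => decide (k n = c))) []).take 6 := by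
  
  have hxsp : (PySem.List.pyRange 1 39).Pairwise (· < ·) := pv_pyRange_pairwise_lt 1 39
  have hcsp : (PySem.List.pyRange 0 (maxc + 1)).Pairwise (· < ·) := pv_pyRange_pairwise_lt 0 (maxc + 1)
  have hbnd : ∀ x ∈ PySem.List.pyRange 1 39, 1 ≤ x ∧ x ≤ 38 := by
    intro x hx; have := PySem.List.mem_pyRange_one.mp hx; omega
  have hperm : ((PySem.List.pyRange 0 (maxc + 1)).flatMap
      (fun c => (PySem.List.pyRange 1 39).filter (fun n => decide (k n = c)))).Perm
      (PySem.List.pyRange 1 39) := by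
    apply pv_flatMap_filter_perm
    · exact hcsp.imp (fun h => ne_of_lt h)
    · intro x hx
      rcases hbnd x hx with ⟨h1, h2⟩
      rcases hub x h1 h2 with ⟨h3, h4⟩
      exact PySem.List.mem_pyRange_one.mpr ⟨h3, by omega⟩
  have hpw := pv_flatMap_filter_pairwise k (PySem.List.pyRange 0 (maxc + 1))
    (PySem.List.pyRange 1 39) hcsp hxsp hbnd
  have hsorted2 : PySem.List.sorted (PySem.List.pyRange 1 39) (fun x => 39 * k x + x)
      = (PySem.List.pyRange 0 (maxc + 1)).flatMap
        (fun c => (PySem.List.pyRange 1 39).filter (fun n => decide (k n = c))) :=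
    PySem.List.sorted_eq_of_perm_of_pairwise_lt _ _ _ hperm hpw
  have hk12 : PySem.List.sorted (PySem.List.pyRange 1 39) k
      = PySem.List.sorted (PySem.List.pyRange 1 39) (fun x => 39 * k x + x) := by
    rw [PySem.List.sorted_eq_foldl_insertBy, PySem.List.sorted_eq_foldl_insertBy]
    apply pv_foldl_insertBy_congr
    · intro x _ y hy; cases hy
    · apply List.Pairwise.imp_of_mem ?_ hxsp
      intro a b ha hb hab
      rcases hbnd a ha with ⟨ha1, ha2⟩
      rcases hbnd b hb with ⟨hb1, hb2⟩
      rw [decide_eq_decide]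
      constructor <;> intro h <;> omega
  rw [hk12, hsorted2]
  rcases pv_foldl_guard_prefix
      (fun c => (PySem.List.pyRange 1 39).filter (fun n => decide (k n = c)))
      (PySem.List.pyRange 0 (maxc + 1)) [] with ⟨hpre, hd⟩
  simp only [List.nil_append] at hpre hd
  rcases hd with he | hlen
  · rw [he]
  · exact (pv_prefix_take hpre 6 hlen).symm

-- ===== VERDICT (by name: the statement is the Claim_ definition above) =====
theorem method_cold_numbers_w100_spec : Claim_equal_method_cold_numbers_w100 := by
  intro history _ _
  unfold Spec_method_cold_numbers_w100
  simp only [method_cold_numbers_w100, method_cold_numbers_w100_alt]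
  have h39 : pvMAX_NUM + 1 = (39 : Int) := rfl
  rw [h39, show (Int.toNat 39) = 39 from rfl]
  set recent := PySem.List.slice history (some (-100)) none with hrec
  set AN := recent.flatMap pvNums with hAN
  -- A's Counter is the counter of the flattened number stream
  have hA : recent.foldl (fun f d => (pvNums d).foldl (fun f n => f.modify n 0 (· + 1)) f) PySem.Dict.empty
      = PySem.Dict.counter AN := by
    rw [PySem.Dict.counter_eq_foldl, hAN, List.foldl_flatMap]
  have hkey : (fun x : Int => (PySem.Dict.counter AN).getD x 0)
      = fun x : Int => (AN.count x : Int) :=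
    funext fun x => PySem.Dict.getD_counter AN x
  simp only [hA, hkey]
  -- B's array is the fold of the same stream
  have hB : recent.foldl (fun f d => (pvNums d).foldl
        (fun f n => if 1 ≤ n ∧ n ≤ pvMAX_NUM then f.set n.toNat (f.getD n.toNat 0 + 1) else f) f)
        (List.replicate 39 (0 : Int))
      = AN.foldl (fun f n => if 1 ≤ n ∧ n ≤ pvMAX_NUM then f.set n.toNat (f.getD n.toNat 0 + 1) else f)
        (List.replicate 39 (0 : Int)) := by
    rw [hAN, List.foldl_flatMap]
  simp only [hB]
  set freqB := AN.foldl (fun f n => if 1 ≤ n ∧ n ≤ pvMAX_NUM then f.set n.toNat (f.getD n.toNat 0 + 1) else f)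
    (List.replicate 39 (0 : Int)) with hfreqB
  rcases pv_array_count AN (List.replicate 39 (0 : Int)) (by simp) with ⟨hlen, hcnt⟩
  rw [← hfreqB] at hlen hcnt
  have hcnt' : ∀ i : Int, 1 ≤ i → i ≤ 38 → freqB.getD i.toNat 0 = (AN.count i : Int) := by
    intro i h1 h2
    rw [hcnt i h1 h2]
    have hz : (List.replicate 39 (0 : Int)).getD i.toNat 0 = 0 := by
      rw [List.getD_eq_getElem?_getD, List.getElem?_replicate]
      split <;> rfl
    rw [hz]
    omega
  set maxc := (PySem.List.max? freqB (fun y => y)).getD 0 with hmaxc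
  have hub : ∀ x : Int, 1 ≤ x → x ≤ 38 → 0 ≤ (AN.count x : Int) ∧ (AN.count x : Int) ≤ maxc := by
    intro x h1 h2
    refine ⟨Int.natCast_nonneg _, ?_⟩
    have hmem : freqB.getD x.toNat 0 ∈ freqB := by
      rw [PySem.List.getD_eq_getElem_of_lt freqB x.toNat 0 (by omega)]
      exact List.getElem_mem _
    obtain ⟨m, hm⟩ : ∃ m, PySem.List.max? freqB (fun y => y) = some m := by
      cases hq : PySem.List.max? freqB (fun y => y) with
      | none =>
        have := (PySem.List.max?_eq_none_iff freqB (fun y => y)).mp hq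
        rw [this] at hlen; simp at hlen
      | some m => exact ⟨m, rfl⟩
    have hle := PySem.List.max?_isMax hm _ hmem
    rw [← hcnt' x h1 h2, hmaxc, hm]
    simpa using hle
  -- the inner scan over 1..38 is the bucket filter for the count key
  have hinner : ∀ (c : Int) (acc : List Int),
      (PySem.List.pyRange 1 39).foldl
        (fun cold n => if freqB.getD n.toNat 0 = c then cold ++ [n] else cold) acc
      = acc ++ (PySem.List.pyRange 1 39).filter (fun n => decide ((AN.count n : Int) = c)) := by
    intro c acc
    simp only [PySem.List.foldl_append_ite_eq_filter]
    congr 1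
    apply List.filter_congr
    intro x hx
    have hb := PySem.List.mem_pyRange_one.mp hx
    rw [hcnt' x (by omega) (by omega)]
  have houter : (fun (a : List Int) (c : Int) => if 6 ≤ a.length then a
        else (PySem.List.pyRange 1 39).foldl
          (fun cold n => if freqB.getD n.toNat 0 = c then cold ++ [n] else cold) a)
      = fun (a : List Int) (c : Int) => if 6 ≤ a.length then a
        else a ++ (PySem.List.pyRange 1 39).filter (fun n => decide ((AN.count n : Int) = c)) := by
    funext a c
    by_cases hga : 6 ≤ a.length
    · rw [if_pos hga, if_pos hga]
    · rw [if_neg hga, if_neg hga, hinner]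
  simp only [houter]
  rw [PySem.List.slice_to _ (by norm_num), PySem.List.slice_to _ (by norm_num)]
  rw [show ((6:Int)).toNat = 6 from rfl]
  rw [pv_select_eq (fun x => (AN.count x : Int)) maxc hub]
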